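-- pv_equiv track=rewrite | github.com/wrteam-jay/blueprint | mcp/src/parser.py | _split_h2_blocks
-- ===== SOURCE A (Python) =====
-- def _split_h2_blocks(content: str) -> list[tuple[str, str, int, int]]:
--     """Split content into (heading, body, start_line, end_line) blocks by ## headings."""
--     blocks: list[tuple[str, str, int, int]] = []
--     lines = content.splitlines()
--     current_heading = ""
--     current_body: list[str] = []
--     current_start = 0
--
--     for i, line in enumerate(lines, 1):
--         if line.startswith("## "):
--             if current_heading:
--                 blocks.append((current_heading, "\n".join(current_body), current_start, i - 1))
--             current_heading = line[3:].strip()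
--             current_body = []
--             current_start = i
--         elif current_heading:
--             current_body.append(line)
--
--     if current_heading:
--         blocks.append((current_heading, "\n".join(current_body), current_start, len(lines)))
--
--     return blocks
-- ===== SOURCE B (Python) =====
-- def _split_h2_blocks(content: str) -> list[tuple[str, str, int, int]]:
--     """Split content into (heading, body, start_line, end_line) blocks by ## headings.
--
--     Two-pass: index every '## ' heading line first (even whitespace-only ones,
--     which act as boundaries but are not emitted), then cut the bodies by slicing
--     between consecutive heading line numbers.
--     """
--     lines = content.splitlines()
--     marks = [(i, line[3:].strip()) for i, line in enumerate(lines, 1)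
--              if line.startswith("## ")]
--     blocks: list[tuple[str, str, int, int]] = []
--     for j, (start, text) in enumerate(marks):
--         if text:
--             end = marks[j + 1][0] - 1 if j + 1 < len(marks) else len(lines)
--             blocks.append((text, "\n".join(lines[start:end]), start, end))
--     return blocks
-- ===== Notes on version B (the rewrite author's own statement) =====
-- stated objective: alternative
-- what changed: Replaced A's single stateful scan carrying current_heading/current_body/current_start accumulators by a two-pass decomposition: first index every H2 heading line (including whitespace-only headings, which act only as block boundaries), then cut each emitted block by slicing the lines between consecutive heading line numbers.
import Mathlib
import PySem

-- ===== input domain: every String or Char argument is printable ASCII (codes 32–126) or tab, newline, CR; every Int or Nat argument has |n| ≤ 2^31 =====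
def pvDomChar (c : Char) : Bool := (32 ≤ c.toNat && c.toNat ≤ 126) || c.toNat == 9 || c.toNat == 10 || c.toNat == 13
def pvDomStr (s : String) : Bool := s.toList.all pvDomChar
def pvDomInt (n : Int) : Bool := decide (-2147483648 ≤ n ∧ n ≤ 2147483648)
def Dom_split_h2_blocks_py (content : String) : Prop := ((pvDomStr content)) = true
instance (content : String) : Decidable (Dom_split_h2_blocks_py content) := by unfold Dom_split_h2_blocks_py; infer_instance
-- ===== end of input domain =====

-- B replaces A's single stateful scan (running heading/body/start accumulators) by a
-- two-pass decomposition: index all '## ' heading lines, then slice the bodies between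
-- consecutive heading line numbers (objective: alternative decomposition, same cost).

-- ===== PORT A =====
-- state = (blocks, current_heading, current_body, current_start); the for-loop over
-- enumerate(lines, 1) becomes structural recursion over the lines with counter i.
def aLoop : List String → Int →
    (List (String × String × Int × Int) × String × List String × Int) →
    (List (String × String × Int × Int) × String × List String × Int)
  | [], _, st => st
  | line :: rest, i, (blocks, h, body, s) =>
    if PySem.Str.startswith line "## " then
      aLoop rest (i + 1)
        ((if h ≠ "" then blocks ++ [(h, PySem.Str.join "\n" body, s, i - 1)] else blocks),
         PySem.Str.strip (PySem.Str.slice line (some 3) none), [], i)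
    else
      aLoop rest (i + 1) (blocks, h, (if h ≠ "" then body ++ [line] else body), s)

def split_h2_blocks_py (content : String) : List (String × String × Int × Int) :=
  let lines := PySem.Str.splitlines content
  match aLoop lines 1 ([], "", [], 0) with
  | (blocks, h, body, s) =>
    if h ≠ "" then blocks ++ [(h, PySem.Str.join "\n" body, s, (lines.length : Int))]
    else blocks

-- ===== PORT B =====
-- the comprehension over enumerate(lines, 1) filtered by startswith
def bMarks (lines : List String) : List (Int × String) :=
  (PySem.List.enumerate lines 1).filterMap
    (fun p => if PySem.Str.startswith p.2 "## " then
        some (p.1, PySem.Str.strip (PySem.Str.slice p.2 (some 3) none)) else none)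

-- the for-loop over marks: the marks[j+1] lookahead is the head of the rest
def bEmit (lines : List String) (n : Int) : List (Int × String) → List (String × String × Int × Int)
  | [] => []
  | (start, text) :: rest =>
    if text ≠ "" then
      let e : Int := match rest with | [] => n | (s2, _) :: _ => s2 - 1
      (text, PySem.Str.join "\n" (PySem.List.slice lines (some start) (some e)), start, e)
        :: bEmit lines n rest
    else bEmit lines n rest

def split_h2_blocks_py_alt (content : String) : List (String × String × Int × Int) :=
  let lines := PySem.Str.splitlines content
  bEmit lines (lines.length : Int) (bMarks lines)

-- ===== PRECONDITION & SPEC =====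
def Spec_split_h2_blocks_py (content : String) (out : List (String × String × Int × Int)) : Prop := out = split_h2_blocks_py_alt content
instance (content : String) (out : List (String × String × Int × Int)) : Decidable (Spec_split_h2_blocks_py content out) := by unfold Spec_split_h2_blocks_py; infer_instance

-- ===== CLAIM (what is proved, stated in full; the proofs are below) =====
def Claim_equal_split_h2_blocks_py : Prop := ∀ (content : String), Dom_split_h2_blocks_py content → Spec_split_h2_blocks_py content (split_h2_blocks_py content)

-- ===== LEMMAS AND PROOFS =====

-- recursive characterisation of bMarks' comprehension
def recMarks : List String → Int → List (Int × String)
  | [], _ => []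
  | line :: rest, i =>
    if PySem.Str.startswith line "## " then
      (i, PySem.Str.strip (PySem.Str.slice line (some 3) none)) :: recMarks rest (i + 1)
    else recMarks rest (i + 1)

theorem bMarks_eq_recMarks (lines : List String) :
    bMarks lines = recMarks lines 1 := by
  unfold bMarks
  generalize (1 : Int) = i
  induction lines generalizing i with
  | nil => simp [recMarks]
  | cons l rest ih =>
    rw [PySem.List.enumerate_cons, List.filterMap_cons, recMarks]
    by_cases h : PySem.Str.startswith l "## " = true
    · rw [if_pos h, if_pos h, ih]
    · rw [if_neg h, if_neg h, ih]

-- finalisation step of A (the trailing `if current_heading:` append)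
def aFin (n : Int) :
    (List (String × String × Int × Int) × String × List String × Int) →
    List (String × String × Int × Int)
  | (blocks, h, body, s) =>
    if h ≠ "" then blocks ++ [(h, PySem.Str.join "\n" body, s, n)] else blocks

-- MAIN INVARIANT: processing the suffix `rest` at line i = pre.length + 1 with state
-- (blocks, h, body, s); if a heading h is open then body is exactly lines[s : i-1].
theorem aLoop_eq_bEmit (lines : List String) :
    ∀ (rest pre : List String) (blocks : List (String × String × Int × Int))
      (h : String) (body : List String) (s : Int),
      lines = pre ++ rest →
      (h ≠ "" → 0 ≤ s ∧ s.toNat ≤ pre.length ∧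
        body = (lines.drop s.toNat).take (pre.length - s.toNat)) →
      aFin (lines.length : Int) (aLoop rest ((pre.length : Int) + 1) (blocks, h, body, s)) =
        blocks ++ bEmit lines (lines.length : Int)
          (if h ≠ "" then (s, h) :: recMarks rest ((pre.length : Int) + 1)
           else recMarks rest ((pre.length : Int) + 1)) := by
  intro rest
  induction rest with
  | nil =>
    intro pre blocks h body s hlines hinv
    by_cases hh : h = ""
    · simp [aLoop, recMarks, aFin, hh, bEmit]
    · obtain ⟨hs0, hsle, hbody⟩ := hinv hh
      have hlen : lines.length = pre.length := by simp [hlines]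
      simp only [aLoop, recMarks, aFin, hh, ne_eq, not_false_iff, if_true, bEmit]
      rw [PySem.List.slice_toNat _ hs0 (by omega), hbody, hlen, Int.toNat_natCast]
  | cons line rest ih =>
    intro pre blocks h body s hlines hinv
    simp only [aLoop, recMarks]
    have hlen1 : ((pre ++ [line]).length : Int) + 1 = ((pre.length : Int) + 1) + 1 := by
      simp only [List.length_append, List.length_cons, List.length_nil]; push_cast; omega
    by_cases hsw : PySem.Str.startswith line "## " = true
    · simp only [hsw, if_true]
      have hstep := ih (pre ++ [line])
          (if h ≠ "" then blocks ++ [(h, PySem.Str.join "\n" body, s, (pre.length : Int) + 1 - 1)] else blocks)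
          (PySem.Str.strip (PySem.Str.slice line (some 3) none)) []
          ((pre.length : Int) + 1)
          (by simp [hlines])
          (by
            intro _
            refine ⟨by positivity, by simp, by simp⟩)
      rw [hlen1] at hstep
      rw [hstep]
      by_cases hh : h = ""
      · by_cases ht : PySem.Str.strip (PySem.Str.slice line (some 3) none) = ""
        · simp [hh, ht, bEmit]
        · simp [hh, ht, bEmit]
      · obtain ⟨hs0, hsle, hbody⟩ := hinv hh
        have hsl :
            PySem.List.slice lines (some s) (some ((pre.length : Int))) = body := by
          rw [PySem.List.slice_toNat _ hs0 (by omega), hbody, Int.toNat_natCast]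
        by_cases ht : PySem.Str.strip (PySem.Str.slice line (some 3) none) = ""
        · simp [hh, ht, bEmit, hsl]
        · simp [hh, ht, bEmit, hsl]
    · simp only [hsw, if_false, Bool.false_eq_true]
      have hstep := ih (pre ++ [line]) blocks h
          (if h ≠ "" then body ++ [line] else body) s (by simp [hlines])
          (by
            intro hh
            obtain ⟨hs0, hsle, hbody⟩ := hinv hh
            refine ⟨hs0, by simp [List.length_append]; omega, ?_⟩
            simp only [hh, ne_eq, not_false_iff, if_true, hbody, List.length_append,
              List.length_singleton]
            rw [show pre.length + 1 - s.toNat = (pre.length - s.toNat) + 1 by omega,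
              List.take_add_one]
            congr 1
            rw [List.getElem?_drop,
              show s.toNat + (pre.length - s.toNat) = pre.length by omega,
              show lines[pre.length]? = some line by subst hlines; simp]
            rfl)
      rw [hlen1] at hstep
      rw [hstep]

-- ===== VERDICT (by name: the statement is the Claim_ definition above) =====
theorem split_h2_blocks_py_spec : Claim_equal_split_h2_blocks_py := by
  intro content _
  unfold Spec_split_h2_blocks_py
  have hA : split_h2_blocks_py content =
      aFin ((PySem.Str.splitlines content).length : Int)
        (aLoop (PySem.Str.splitlines content) 1 ([], "", [], 0)) := rfl
  have hB : split_h2_blocks_py_alt content =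
      bEmit (PySem.Str.splitlines content) ((PySem.Str.splitlines content).length : Int)
        (bMarks (PySem.Str.splitlines content)) := rfl
  have h := aLoop_eq_bEmit (PySem.Str.splitlines content) (PySem.Str.splitlines content) []
      [] "" [] 0 (by simp) (by intro hc; exact absurd rfl hc)
  simp only [List.length_nil, Nat.cast_zero, zero_add, ne_eq, not_true_eq_false, if_false,
    List.nil_append] at h
  rw [hA, hB, bMarks_eq_recMarks, ← h]
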